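-- pv_equiv track=rewrite | github.com/ISIS1225DEVS/HallOfFame-R4-2023-10 | App-S09/model.py | separar_id_completo
-- ===== SOURCE A (Python) =====
-- def separar_id_completo(dato):
--
--     componentes=[]
--     inicio=0
--     a=dato.count("_")
--     if a==4:
--         contador=0
--         for i in range(0, len(dato)):
--             if contador==2:
--                 if dato[i] == "_":
--                         contador+=1
--             else:
--                 if len(componentes)==3:
--                     info=dato[inicio:]
--                     componentes.append(info)
--                 else:
--                     if dato[i] == "_":
--                         contador+=1
--                         info=dato[inicio:i]
--                         inicio=i+1
--                         componentes.append(info)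
--
--
--     else:
--         for i in range(0, len(dato)):
--             if len(componentes)==3:
--                 info=dato[inicio:]
--                 componentes.append(info)
--             else:
--                 if dato[i] == "_":
--                     info=dato[inicio:i]
--                     inicio=i+1
--                     componentes.append(info)
--
--     return componentes
-- ===== SOURCE B (Python) =====
-- def separar_id_completo(dato):
--     """Split an id of up to four underscore-separated fields.
--
--     Fields end at each of the first three underscores; whatever follows the
--     third cut is the last field (kept only when non-empty).  An id with four
--     underscores carries an embedded underscore in its third field, so the
--     third cut is then the fourth underscore rather than the third.
--     """
--     cuts = [i for i, ch in enumerate(dato) if ch == "_"]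
--     if len(cuts) == 4:
--         cuts = [cuts[0], cuts[1], cuts[3]]
--     bounds = cuts[:3]
--     out = []
--     start = 0
--     for p in bounds:
--         out.append(dato[start:p])
--         start = p + 1
--     if len(bounds) == 3:
--         tail = dato[start:]
--         if tail:
--             out.append(tail)
--     return out
-- ===== Notes on version B (the rewrite author's own statement) =====
-- stated objective: simpler
-- what changed: A runs a per-character state machine with counter/loop variables (componentes, inicio, contador); B builds the list of underscore positions once, picks the three cut points (the fourth underscore replaces the third when there are exactly four), and returns direct slices plus the non-empty remainder.
-- intended difference: On ids with five or more underscores A keeps splitting after it has already appended the full remainder as the fourth component, returning overlapping extra fragments (e.g. 'a_b_c_d_e_f' -> ['a','b','c','d_e_f','d','e']); B returns the first three fields plus the remainder ['a','b','c','d_e_f'], the intended decomposition. — e.g. on separar_id_completo("a_b_c_d_e_f"): A returns ["a", "b", "c", "d_e_f", "d", "e"], B returns ["a", "b", "c", "d_e_f"]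
import Mathlib
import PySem

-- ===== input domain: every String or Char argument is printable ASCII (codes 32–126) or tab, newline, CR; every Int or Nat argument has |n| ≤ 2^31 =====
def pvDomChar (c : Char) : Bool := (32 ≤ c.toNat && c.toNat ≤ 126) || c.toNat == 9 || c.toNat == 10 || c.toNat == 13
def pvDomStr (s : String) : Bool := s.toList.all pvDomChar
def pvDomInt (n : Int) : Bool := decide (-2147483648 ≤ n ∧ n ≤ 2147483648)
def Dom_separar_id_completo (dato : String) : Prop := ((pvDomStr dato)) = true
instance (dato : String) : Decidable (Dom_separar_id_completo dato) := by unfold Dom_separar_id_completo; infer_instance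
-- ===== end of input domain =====

-- B replaces A's per-character state machine by an underscore-positions table and direct slices; on ids with five or more underscores A returns extra overlapping fragments after the remainder and B returns the first three fields plus the remainder (the stated D_ difference).


-- ===== PORT A =====
-- string indexing/slicing is ported on the code-point list (dato.toList), which is exact for Python's str

-- the for-loop of A's 'a == 4' branch, state (componentes, inicio, contador), index i
def sepLoop4 (l : List Char) (i : Nat) (comps : List String) (inicio : Nat) (contador : Nat) : List String :=
  if h : i < l.length then
    if contador = 2 then
      if l[i] = '_' then sepLoop4 l (i+1) comps inicio (contador+1)
      else sepLoop4 l (i+1) comps inicio contador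
    else
      if comps.length = 3 then
        sepLoop4 l (i+1) (comps ++ [String.ofList (PySem.List.slice l (some (inicio : Int)) none)]) inicio contador
      else if l[i] = '_' then
        sepLoop4 l (i+1) (comps ++ [String.ofList (PySem.List.slice l (some (inicio : Int)) (some (i : Int)))]) (i+1) (contador+1)
      else sepLoop4 l (i+1) comps inicio contador
  else comps
termination_by l.length - i

-- the for-loop of A's else branch, state (componentes, inicio), index i
def sepLoopElse (l : List Char) (i : Nat) (comps : List String) (inicio : Nat) : List String :=
  if h : i < l.length then
    if comps.length = 3 then
      sepLoopElse l (i+1) (comps ++ [String.ofList (PySem.List.slice l (some (inicio : Int)) none)]) inicio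
    else if l[i] = '_' then
      sepLoopElse l (i+1) (comps ++ [String.ofList (PySem.List.slice l (some (inicio : Int)) (some (i : Int)))]) (i+1)
    else sepLoopElse l (i+1) comps inicio
  else comps
termination_by l.length - i

def separar_id_completo (dato : String) : List String :=
  let l := dato.toList
  if PySem.Str.count dato "_" = 4 then sepLoop4 l 0 [] 0 0
  else sepLoopElse l 0 [] 0

-- ===== PORT B =====
-- [i for i, ch in enumerate(dato) if ch == '_'] (i is the absolute index)
def altPos (cs : List Char) (i : Nat) : List Nat :=
  match cs with
  | [] => []
  | c :: t => if c = '_' then i :: altPos t (i+1) else altPos t (i+1)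

-- the 'for p in bounds' loop, state (out, start); dato[start:p] with start ≤ p is (drop start).take (p-start), exact here
def altLoop (l : List Char) (out : List String) (start : Nat) : List Nat → List String × Nat
  | [] => (out, start)
  | p :: ps => altLoop l (out ++ [String.ofList ((l.drop start).take (p - start))]) (p+1) ps

def separar_id_completo_alt (dato : String) : List String :=
  let l := dato.toList
  let cuts := altPos l 0
  let cuts2 := match cuts with
    | [c0, c1, _c2, c3] => [c0, c1, c3]
    | _ => cuts
  let bounds := cuts2.take 3
  let r := altLoop l [] 0 bounds
  if bounds.length = 3 then
    let tail := l.drop r.2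
    if tail ≠ [] then r.1 ++ [String.ofList tail] else r.1
  else r.1

-- ===== PRECONDITION & SPEC =====
-- On ids with five or more underscores A keeps splitting after it has already appended the full remainder
-- as the fourth component, returning extra overlapping fragments (e.g. "a_b_c_d_e_f" ↦ ["a","b","c","d_e_f","d","e"]);
-- B returns the first three fields plus the remainder ["a","b","c","d_e_f"], the intended decomposition.
def D_separar_id_completo (dato : String) : Prop := 5 ≤ dato.toList.count '_'
instance (dato : String) : Decidable (D_separar_id_completo dato) := by unfold D_separar_id_completo; infer_instance

def Spec_separar_id_completo (dato : String) (out : List String) : Prop := ¬ D_separar_id_completo dato → out = separar_id_completo_alt dato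
instance (dato : String) (out : List String) : Decidable (Spec_separar_id_completo dato out) := by unfold Spec_separar_id_completo; infer_instance

def pvDiffWitness_separar_id_completo : String := "a_b_c_d_e_f"
def pvDiffWitnessOut_separar_id_completo : (List String) × (List String) :=
  (["a", "b", "c", "d_e_f", "d", "e"], ["a", "b", "c", "d_e_f"])

-- ===== CLAIM (what is proved, stated in full; the proofs are below) =====
def Claim_unchanged_separar_id_completo : Prop := ∀ (dato : String), Dom_separar_id_completo dato → Spec_separar_id_completo dato (separar_id_completo dato)
def Claim_changed_separar_id_completo : Prop := Dom_separar_id_completo (pvDiffWitness_separar_id_completo) ∧ D_separar_id_completo (pvDiffWitness_separar_id_completo) ∧ separar_id_completo (pvDiffWitness_separar_id_completo) = pvDiffWitnessOut_separar_id_completo.1 ∧ separar_id_completo_alt (pvDiffWitness_separar_id_completo) = pvDiffWitnessOut_separar_id_completo.2 ∧ pvDiffWitnessOut_separar_id_completo.1 ≠ pvDiffWitnessOut_separar_id_completo.2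
def Claim_exact_separar_id_completo : Prop := ∀ (dato : String), Dom_separar_id_completo dato → D_separar_id_completo dato → separar_id_completo dato ≠ separar_id_completo_alt dato

-- ===== LEMMAS AND PROOFS =====

-- positions of '_' at index ≥ i
def Qp (l : List Char) (i : Nat) : List Nat := altPos (List.drop i l) i

theorem Qp_step (l : List Char) (i : Nat) :
    Qp l i = if h : i < l.length then
               (if l[i] = '_' then i :: Qp l (i+1) else Qp l (i+1))
             else [] := by
  by_cases h : i < l.length
  · rw [Qp, List.drop_eq_getElem_cons h]
    simp [altPos, Qp, h]
  · simp [Qp, List.drop_eq_nil_of_le (Nat.le_of_not_lt h), altPos, h]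

theorem Qp_nil_of_ge (l : List Char) (i : Nat) (h : l.length ≤ i) : Qp l i = [] := by
  rw [Qp_step]
  simp [Nat.not_lt.mpr h]

theorem Qp_head (l : List Char) :
    ∀ m i p ps, l.length - i ≤ m → Qp l i = p :: ps →
      i ≤ p ∧ p < l.length ∧ ps = Qp l (p+1) := by
  intro m
  induction m with
  | zero =>
      intro i p ps hm hQ
      rw [Qp_step] at hQ
      have h : ¬ i < l.length := by omega
      simp [h] at hQ
  | succ m ih =>
      intro i p ps hm hQ
      rw [Qp_step] at hQ
      by_cases h : i < l.length
      · simp only [dif_pos h] at hQ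
        by_cases hu : l[i] = '_'
        · simp [hu] at hQ
          obtain ⟨rfl, hQ2⟩ := hQ
          exact ⟨le_refl _, h, hQ2.symm⟩
        · simp [hu] at hQ
          have := ih (i+1) p ps (by omega) hQ
          exact ⟨by omega, this.2.1, this.2.2⟩
      · simp [h] at hQ

theorem Qp_head' (l : List Char) {i p : Nat} {ps : List Nat} (h : Qp l i = p :: ps) :
    i ≤ p ∧ p < l.length ∧ ps = Qp l (p+1) :=
  Qp_head l (l.length - i) i p ps (le_refl _) h

theorem Qp_nil_succ (l : List Char) (i : Nat) (h : Qp l i = []) : Qp l (i+1) = [] := by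
  rw [Qp_step] at h
  by_cases hi : i < l.length
  · simp only [dif_pos hi] at h
    by_cases hu : l[i] = '_' <;> simp [hu] at h
    exact h
  · exact Qp_nil_of_ge l (i+1) (by omega)

-- one collecting step of the else-loop: skip to the next underscore, append the piece
theorem sepLoopElse_step (l : List Char) :
    ∀ m i comps start, comps.length ≠ 3 → l.length - i ≤ m →
      sepLoopElse l i comps start =
        match Qp l i with
        | [] => comps
        | p :: _ => sepLoopElse l (p+1)
            (comps ++ [String.ofList (PySem.List.slice l (some (start : Int)) (some (p : Int)))]) (p+1) := by
  intro m
  induction m with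
  | zero =>
      intro i comps start _ hm
      rw [Qp_nil_of_ge l i (by omega), sepLoopElse]
      simp [Nat.not_lt.mpr (by omega : l.length ≤ i)]
  | succ m ih =>
      intro i comps start h3 hm
      by_cases h : i < l.length
      · rw [sepLoopElse, dif_pos h, if_neg h3, Qp_step, dif_pos h]
        by_cases hu : l[i] = '_'
        · simp [hu]
        · rw [if_neg hu, if_neg hu]
          exact ih (i+1) comps start h3 (by omega)
      · rw [Qp_nil_of_ge l i (by omega), sepLoopElse]
        simp [h]

-- once four components exist and no underscore remains, the else-loop returns its components
theorem sepLoopElse_const (l : List Char) :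
    ∀ m i comps start, 4 ≤ comps.length → Qp l i = [] → l.length - i ≤ m →
      sepLoopElse l i comps start = comps := by
  intro m
  induction m with
  | zero =>
      intro i comps start _ _ hm
      rw [sepLoopElse]
      simp [Nat.not_lt.mpr (by omega : l.length ≤ i)]
  | succ m ih =>
      intro i comps start h4 hQ hm
      by_cases h : i < l.length
      · have hu : ¬ l[i] = '_' := by
          intro hu
          rw [Qp_step, dif_pos h, if_pos hu] at hQ
          exact (List.cons_ne_nil _ _) hQ
        have hQ1 : Qp l (i+1) = [] := by
          rw [Qp_step, dif_pos h, if_neg hu] at hQ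
          exact hQ
        rw [sepLoopElse, dif_pos h, if_neg (by omega), if_neg hu]
        exact ih (i+1) comps start h4 hQ1 (by omega)
      · rw [sepLoopElse]
        simp [h]

-- once four components exist, the else-loop adds one component per remaining underscore
theorem sepLoopElse_len (l : List Char) :
    ∀ m i comps start, 4 ≤ comps.length → l.length - i ≤ m →
      (sepLoopElse l i comps start).length = comps.length + (Qp l i).length := by
  intro m
  induction m with
  | zero =>
      intro i comps start _ hm
      rw [Qp_nil_of_ge l i (by omega), sepLoopElse]
      simp [Nat.not_lt.mpr (by omega : l.length ≤ i)]
  | succ m ih =>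
      intro i comps start h4 hm
      by_cases h : i < l.length
      · rw [sepLoopElse, dif_pos h, if_neg (by omega), Qp_step, dif_pos h]
        by_cases hu : l[i] = '_'
        · rw [if_pos hu, if_pos hu,
              ih (i+1) (comps ++ [String.ofList (PySem.List.slice l (some (start : Int)) (some (i : Int)))]) (i+1)
                (by simp; omega) (by omega)]
          simp
          omega
        · rw [if_neg hu, if_neg hu]
          exact ih (i+1) comps start h4 (by omega)
      · rw [Qp_nil_of_ge l i (by omega), sepLoopElse]
        simp [h]

-- loop4: a collecting step while contador ≠ 2 and fewer than 3 components
theorem sepLoop4_step (l : List Char) :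
    ∀ m i comps start c, c ≠ 2 → comps.length ≠ 3 → l.length - i ≤ m →
      sepLoop4 l i comps start c =
        match Qp l i with
        | [] => comps
        | p :: _ => sepLoop4 l (p+1)
            (comps ++ [String.ofList (PySem.List.slice l (some (start : Int)) (some (p : Int)))]) (p+1) (c+1) := by
  intro m
  induction m with
  | zero =>
      intro i comps start c _ _ hm
      rw [Qp_nil_of_ge l i (by omega), sepLoop4]
      simp [Nat.not_lt.mpr (by omega : l.length ≤ i)]
  | succ m ih =>
      intro i comps start c hc h3 hm
      by_cases h : i < l.length
      · rw [sepLoop4, dif_pos h, if_neg hc, if_neg h3, Qp_step, dif_pos h]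
        by_cases hu : l[i] = '_'
        · simp [hu]
        · rw [if_neg hu, if_neg hu]
          exact ih (i+1) comps start c hc h3 (by omega)
      · rw [Qp_nil_of_ge l i (by omega), sepLoop4]
        simp [h]

-- loop4 with contador = 2: skip past the next underscore without appending
theorem sepLoop4_skip (l : List Char) :
    ∀ m i comps start, l.length - i ≤ m →
      sepLoop4 l i comps start 2 =
        match Qp l i with
        | [] => comps
        | p :: _ => sepLoop4 l (p+1) comps start 3 := by
  intro m
  induction m with
  | zero =>
      intro i comps start hm
      rw [Qp_nil_of_ge l i (by omega), sepLoop4]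
      simp [Nat.not_lt.mpr (by omega : l.length ≤ i)]
  | succ m ih =>
      intro i comps start hm
      by_cases h : i < l.length
      · rw [sepLoop4, dif_pos h, if_pos rfl, Qp_step, dif_pos h]
        by_cases hu : l[i] = '_'
        · simp [hu]
        · rw [if_neg hu, if_neg hu]
          exact ih (i+1) comps start (by omega)
      · rw [Qp_nil_of_ge l i (by omega), sepLoop4]
        simp [h]

-- loop4 with ≥ 4 components, contador > 2 and no underscore left returns its components
theorem sepLoop4_const (l : List Char) :
    ∀ m i comps start c, 4 ≤ comps.length → 2 < c → Qp l i = [] → l.length - i ≤ m →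
      sepLoop4 l i comps start c = comps := by
  intro m
  induction m with
  | zero =>
      intro i comps start c _ _ _ hm
      rw [sepLoop4]
      simp [Nat.not_lt.mpr (by omega : l.length ≤ i)]
  | succ m ih =>
      intro i comps start c h4 hc hQ hm
      by_cases h : i < l.length
      · have hu : ¬ l[i] = '_' := by
          intro hu
          rw [Qp_step, dif_pos h, if_pos hu] at hQ
          exact (List.cons_ne_nil _ _) hQ
        have hQ1 : Qp l (i+1) = [] := by
          rw [Qp_step, dif_pos h, if_neg hu] at hQ
          exact hQ
        rw [sepLoop4, dif_pos h, if_neg (by omega), if_neg (by omega), if_neg hu]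
        exact ih (i+1) comps start c h4 hc hQ1 (by omega)
      · rw [sepLoop4]
        simp [h]

-- str.count of a single-character string is the element count
theorem count_go_single (c : Char) :
    ∀ fuel cs acc, cs.length ≤ fuel →
      PySem.Chars.count.go [c] fuel cs acc = acc + cs.count c := by
  intro fuel
  induction fuel with
  | zero =>
      intro cs acc hlen
      have : cs = [] := List.eq_nil_of_length_eq_zero (by omega)
      subst this
      rw [PySem.Chars.count.go]
      simp
  | succ fuel ih =>
      intro cs acc hlen
      cases cs with
      | nil => rw [PySem.Chars.count.go]; simp; omega
      | cons hd t =>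
          rw [PySem.Chars.count.go]
          by_cases hc : c = hd
          · subst hc
            simp only [List.isPrefixOf, BEq.rfl, Bool.true_and, if_true]
            rw [ih _ _ (by simp at hlen ⊢; omega)]
            simp
            omega
          · have hpre : ([c].isPrefixOf (hd :: t)) = false := by
              simp [List.isPrefixOf, hc]
            rw [hpre]
            simp only [Bool.false_eq_true, if_false]
            rw [ih t acc (by simp at hlen; omega)]
            have hcd : ¬ hd = c := fun h => hc h.symm
            simp [hcd]

theorem altPos_length (cs : List Char) : ∀ i, (altPos cs i).length = cs.count '_' := by
  induction cs with
  | nil => intro i; simp [altPos]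
  | cons c t ih =>
      intro i
      by_cases hc : c = '_' <;> simp [altPos, hc, ih]

theorem count_eq_altPos_length (dato : String) :
    PySem.Str.count dato "_" = (altPos dato.toList 0).length := by
  rw [PySem.Str.count]
  have h1 : ("_" : String).toList = ['_'] := rfl
  rw [h1, PySem.Chars.count]
  simp only [List.isEmpty]
  rw [count_go_single '_' dato.toList.length dato.toList 0 (le_refl _), altPos_length]
  simp

-- cast-normalised forms of the slice lemmas (the start index arrives as ↑p + 1)
theorem slice_cast_succ (l : List Char) (a b : Nat) :
    PySem.List.slice l (some ((a : Int) + 1)) (some (b : Int)) = (l.drop (a+1)).take (b - (a+1)) := by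
  have h : ((a : Int) + 1) = ((a + 1 : Nat) : Int) := by push_cast; ring
  rw [h, PySem.List.slice_natCast]

theorem slice_from_cast_succ (l : List Char) (a : Nat) :
    PySem.List.slice l (some ((a : Int) + 1)) none = l.drop (a+1) := by
  have h : ((a : Int) + 1) = ((a + 1 : Nat) : Int) := by push_cast; ring
  rw [h, PySem.List.slice_from_natCast]

theorem separar_id_completo_spec : Claim_unchanged_separar_id_completo := by
  unfold Claim_unchanged_separar_id_completo Spec_separar_id_completo
  intro dato _ hD
  have hcnt : ¬ 5 ≤ dato.toList.count '_' := hD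
  rw [separar_id_completo, separar_id_completo_alt]
  rw [count_eq_altPos_length]
  have hQ0 : Qp dato.toList 0 = altPos dato.toList 0 := rfl
  set l := dato.toList with hl
  rw [← altPos_length l 0] at hcnt
  rcases hP : altPos l 0 with _ | ⟨p0, _ | ⟨p1, _ | ⟨p2, _ | ⟨p3, rest⟩⟩⟩⟩
  · -- no underscore
    rw [if_neg (by simp)]
    rw [sepLoopElse_step l l.length 0 [] 0 (by simp) (by omega), hQ0, hP]
    simp [altLoop]
  · -- one underscore
    rw [if_neg (by simp)]
    rw [sepLoopElse_step l l.length 0 [] 0 (by simp) (by omega), hQ0, hP]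
    simp only []
    have h0 := Qp_head' l (hQ0.trans hP)
    rw [sepLoopElse_step l l.length (p0+1) _ (p0+1) (by simp) (by omega), ← h0.2.2]
    simp [altLoop]
  · -- two underscores
    rw [if_neg (by simp)]
    have h0 := Qp_head' l (hQ0.trans hP)
    have h1 := Qp_head' l h0.2.2.symm
    rw [sepLoopElse_step l l.length 0 [] 0 (by simp) (by omega), hQ0, hP]
    simp only []
    rw [sepLoopElse_step l l.length (p0+1) _ (p0+1) (by simp) (by omega), ← h0.2.2]
    simp only []
    rw [sepLoopElse_step l l.length (p1+1) _ (p1+1) (by simp) (by omega), ← h1.2.2]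
    simp [altLoop, slice_cast_succ]
  · -- exactly three underscores: else branch, tail iff p2+1 < length
    rw [if_neg (by simp)]
    have h0 := Qp_head' l (hQ0.trans hP)
    have h1 := Qp_head' l h0.2.2.symm
    have h2 := Qp_head' l h1.2.2.symm
    rw [sepLoopElse_step l l.length 0 [] 0 (by simp) (by omega), hQ0, hP]
    simp only []
    rw [sepLoopElse_step l l.length (p0+1) _ (p0+1) (by simp) (by omega), ← h0.2.2]
    simp only []
    rw [sepLoopElse_step l l.length (p1+1) _ (p1+1) (by simp) (by omega), ← h1.2.2]
    simp only []
    rw [sepLoopElse]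
    by_cases h : p2 + 1 < l.length
    · rw [dif_pos h, if_pos (by simp)]
      rw [sepLoopElse_const l l.length (p2+2) _ (p2+1) (by simp) (Qp_nil_succ l (p2+1) h2.2.2.symm) (by omega)]
      have htail : l.drop (p2+1) ≠ [] := by
        simp [List.drop_eq_nil_iff]
        omega
      simp [altLoop, slice_cast_succ, slice_from_cast_succ, htail]
    · rw [dif_neg h]
      have htail : l.drop (p2+1) = [] := List.drop_eq_nil_of_le (by omega)
      simp [altLoop, slice_cast_succ, htail]
  · rcases rest with _ | ⟨p4, rest3⟩
    · -- exactly four underscores: the contador branch merges across the third underscore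
      rw [if_pos (by simp)]
      have h0 := Qp_head' l (hQ0.trans hP)
      have h1 := Qp_head' l h0.2.2.symm
      have h2 := Qp_head' l h1.2.2.symm
      have h3 := Qp_head' l h2.2.2.symm
      rw [sepLoop4_step l l.length 0 [] 0 0 (by omega) (by simp) (by omega), hQ0, hP]
      simp only []
      rw [sepLoop4_step l l.length (p0+1) _ (p0+1) 1 (by omega) (by simp) (by omega), ← h0.2.2]
      simp only []
      rw [sepLoop4_skip l l.length (p1+1) _ (p1+1) (by omega), ← h1.2.2]
      simp only []
      rw [sepLoop4_step l l.length (p2+1) _ (p1+1) 3 (by omega) (by simp) (by omega), ← h2.2.2]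
      simp only []
      rw [sepLoop4]
      by_cases h : p3 + 1 < l.length
      · rw [dif_pos h, if_neg (by omega), if_pos (by simp)]
        rw [sepLoop4_const l l.length (p3+2) _ (p3+1) 4 (by simp) (by omega) (Qp_nil_succ l (p3+1) h3.2.2.symm) (by omega)]
        have htail : l.drop (p3+1) ≠ [] := by
          simp [List.drop_eq_nil_iff]
          omega
        simp [altLoop, slice_cast_succ, slice_from_cast_succ, htail]
      · rw [dif_neg h]
        have htail : l.drop (p3+1) = [] := List.drop_eq_nil_of_le (by omega)
        simp [altLoop, slice_cast_succ, htail]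
    · -- five or more underscores: inside D_, nothing to prove
      exact absurd (by rw [hP]; simp) hcnt

theorem separar_id_completo_changed : Claim_changed_separar_id_completo := by
  unfold Claim_changed_separar_id_completo pvDiffWitness_separar_id_completo pvDiffWitnessOut_separar_id_completo
  refine ⟨by decide, by decide, ?_, ?_, by decide⟩
  · simp [separar_id_completo, sepLoopElse, PySem.Str.count, PySem.Chars.count,
      PySem.Chars.count.go, PySem.List.slice]
  · simp [separar_id_completo_alt, altPos, altLoop]

theorem separar_id_completo_tight : Claim_exact_separar_id_completo := by
  unfold Claim_exact_separar_id_completo D_separar_id_completo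
  intro dato _ hD
  rw [separar_id_completo, separar_id_completo_alt]
  rw [count_eq_altPos_length]
  have hQ0 : Qp dato.toList 0 = altPos dato.toList 0 := rfl
  set l := dato.toList with hl
  rw [← altPos_length l 0] at hD
  rcases hP : altPos l 0 with _ | ⟨p0, _ | ⟨p1, _ | ⟨p2, _ | ⟨p3, _ | ⟨p4, rest3⟩⟩⟩⟩⟩
  · exact absurd hD (by rw [hP]; simp)
  · exact absurd hD (by rw [hP]; simp)
  · exact absurd hD (by rw [hP]; simp)
  · exact absurd hD (by rw [hP]; simp)
  · exact absurd hD (by rw [hP]; simp)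
  have h0 := Qp_head' l (hQ0.trans hP)
  have h1 := Qp_head' l h0.2.2.symm
  have h2 := Qp_head' l h1.2.2.symm
  have h3 := Qp_head' l h2.2.2.symm
  have h4 := Qp_head' l h3.2.2.symm
  rw [if_neg (by simp only [List.length_cons]; omega)]
  -- A walks to three components, appends the remainder, then one more component per remaining underscore
  rw [sepLoopElse_step l l.length 0 [] 0 (by simp) (by omega), hQ0, hP]
  simp only []
  rw [sepLoopElse_step l l.length (p0+1) _ (p0+1) (by simp) (by omega), ← h0.2.2]
  simp only []
  rw [sepLoopElse_step l l.length (p1+1) _ (p1+1) (by simp) (by omega), ← h1.2.2]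
  simp only []
  rw [sepLoopElse]
  have hlt : p2 + 1 < l.length := by omega
  rw [dif_pos hlt, if_pos (by simp)]
  -- the underscores after index p2+1: at least one remains (p4 at least)
  have hQrest : 1 ≤ (Qp l (p2+1+1)).length := by
    by_cases hp3 : p3 = p2 + 1
    · have h := h3.2.2.symm
      rw [hp3] at h
      rw [h]
      simp
    · have hu : ¬ l[p2+1]'(hlt) = '_' := by
        intro hu
        have hs := Qp_step l (p2+1)
        rw [dif_pos hlt, if_pos hu, ← h2.2.2] at hs
        exact hp3 (by have hh := congrArg List.headI hs; simpa using hh)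
      have hs := Qp_step l (p2+1)
      rw [dif_pos hlt, if_neg hu] at hs
      rw [← hs, ← h2.2.2]
      simp
  intro hEq
  have hlenB := congrArg List.length hEq
  rw [sepLoopElse_len l l.length (p2+1+1) _ (p2+1) (by simp) (by omega)] at hlenB
  have htail : l.drop (p2+1) ≠ [] := by
    simp [List.drop_eq_nil_iff]
    omega
  simp [altLoop, htail] at hlenB
  rw [hlenB] at hQrest
  simp at hQrest
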